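-- pv_equiv track=rewrite | github.com/hokoro/Algorithm | Strproblem/test1.py | solution
-- ===== SOURCE A (Python) =====
-- def solution(S):
--     # write your code in Python 3.6
--     s_list = list(S)
--     last_str = ''
--     for s in s_list:
--         if s == 'a' and last_str == 'b':
--             return False
--         last_str = s
--
--     return True
-- ===== SOURCE B (Python) =====
-- def solution(S):
--     return 'ba' not in S
-- ===== Notes on version B (the rewrite author's own statement) =====
-- stated objective: idiomatic
-- what changed: Replaces A's explicit character loop that tracks the previous character in a state variable with a single negated substring membership test delegated to Python's C-level string search.
import Mathlib
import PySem

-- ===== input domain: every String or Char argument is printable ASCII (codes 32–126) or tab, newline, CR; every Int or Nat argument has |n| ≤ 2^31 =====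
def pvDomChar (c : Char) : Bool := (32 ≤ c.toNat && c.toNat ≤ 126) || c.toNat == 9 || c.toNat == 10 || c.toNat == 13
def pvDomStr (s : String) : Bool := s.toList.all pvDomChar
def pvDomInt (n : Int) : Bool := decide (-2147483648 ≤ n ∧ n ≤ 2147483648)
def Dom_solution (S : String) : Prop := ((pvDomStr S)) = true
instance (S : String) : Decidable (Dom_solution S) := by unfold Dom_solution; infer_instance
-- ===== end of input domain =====

-- B changes: one substring test ('ba' not in S) instead of A's previous-character state loop (idiomatic).

-- ===== PORT A =====
-- the loop over list(S) with early 'return False' and state last_str (none = the initial '')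
def solutionLoop (last : Option Char) (l : List Char) : Bool :=
  match l with
  | [] => true
  | c :: rest => if c = 'a' ∧ last = some 'b' then false else solutionLoop (some c) rest

def solution (S : String) : Bool := solutionLoop none S.toList

-- ===== PORT B =====
def solution_alt (S : String) : Bool := !(PySem.Str.isIn "ba" S)

-- ===== PRECONDITION & SPEC =====
def Spec_solution (S : String) (out : Bool) : Prop := out = solution_alt S
instance (S : String) (out : Bool) : Decidable (Spec_solution S out) := by unfold Spec_solution; infer_instance

-- ===== CLAIM (what is proved, stated in full; the proofs are below) =====
def Claim_equal_solution : Prop := ∀ (S : String), Dom_solution S → Spec_solution S (solution S)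

-- ===== LEMMAS AND PROOFS =====

theorem solutionLoop_false_iff (l : List Char) (last : Option Char) :
    solutionLoop last l = false ↔
      ((last = some 'b' ∧ ∃ t, l = 'a' :: t) ∨ ['b', 'a'] <:+: l) := by
  induction l generalizing last with
  | nil =>
      simp [solutionLoop]
  | cons c rest ih =>
      by_cases h : c = 'a' ∧ last = some 'b'
      · simp [solutionLoop, h.1, h.2]
      · rw [solutionLoop, if_neg h, ih]
        constructor
        · rintro (⟨hc, t, ht⟩ | hinf)
          · injection hc with hc
            subst ht
            exact Or.inr (List.infix_cons_iff.mpr (Or.inl (by simp [hc])))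
          · exact Or.inr (hinf.trans (List.suffix_cons c rest).isInfix)
        · rintro (⟨hlast, t, ht⟩ | hinf)
          · exact absurd ⟨by injection ht, hlast⟩ h
          · rcases List.infix_cons_iff.mp hinf with hpre | hinf'
            · rcases List.cons_prefix_cons.mp hpre with ⟨hc, hpre'⟩
              obtain ⟨u, hu⟩ := hpre'
              exact Or.inl ⟨by simp [← hc], u, by simpa using hu.symm⟩
            · exact Or.inr hinf'

theorem solution_spec : Claim_equal_solution := by
  intro S _
  unfold Spec_solution solution solution_alt
  rw [Bool.eq_iff_iff]
  rw [← Bool.not_eq_false (solutionLoop none S.toList), solutionLoop_false_iff]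
  simp [PySem.Chars.isIn_eq_false_iff]
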